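-- pv_equiv track=rewrite | github.com/jacob414/rm-files | rmfiles/rmdoc/__init__.py | _infer_doc_id_from_names
-- ===== SOURCE A (Python) =====
-- def _infer_doc_id_from_names(names: list[str]) -> str | None:
--     """Return the leading `<doc_id>` from a list of zip names, if consistent."""
--     ids: set[str] = set()
--     for n in names:
--         base = n.split("/", 1)[0]
--         if base and (base.endswith(".content") or base.endswith(".metadata")):
--             ids.add(base.split(".")[0])
--         elif base:
--             ids.add(base)
--     return ids.pop() if len(ids) == 1 else None
-- ===== SOURCE B (Python) =====
-- def _infer_doc_id_from_names(names: list[str]) -> str | None: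
--     """Return the leading `<doc_id>` from a list of zip names, if consistent."""
--     candidate = None
--     for n in names:
--         base = n.split("/", 1)[0]
--         if not base:
--             continue
--         doc = base.split(".")[0] if base.endswith((".content", ".metadata")) else base
--         if candidate is None:
--             candidate = doc
--         elif doc != candidate:
--             return None
--     return candidate
-- ===== Notes on version B (the rewrite author's own statement) =====
-- stated objective: simpler
-- what changed: Replaces building a set of all ids and then testing len==1 with a single consistency scan that keeps one candidate id and returns None early on the first mismatch.
import Mathlib
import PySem

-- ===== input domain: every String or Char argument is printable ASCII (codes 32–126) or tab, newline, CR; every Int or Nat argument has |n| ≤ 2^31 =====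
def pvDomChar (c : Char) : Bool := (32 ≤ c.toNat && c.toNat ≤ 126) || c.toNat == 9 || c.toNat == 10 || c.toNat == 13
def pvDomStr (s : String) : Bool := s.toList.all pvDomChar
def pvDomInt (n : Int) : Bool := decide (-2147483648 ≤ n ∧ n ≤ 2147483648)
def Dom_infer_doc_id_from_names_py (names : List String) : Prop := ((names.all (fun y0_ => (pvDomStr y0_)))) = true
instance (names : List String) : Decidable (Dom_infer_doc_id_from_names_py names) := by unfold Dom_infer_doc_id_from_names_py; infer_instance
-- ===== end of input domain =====

-- B replaces A's "collect the set of all ids, then test len == 1" with a single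
-- candidate-and-mismatch consistency scan with an early None return (objective: simpler).

-- ===== PORT A =====
-- n.split("/", 1)[0]: sep ≠ "" so splitMax? is some, and a split result is never empty,
-- so the match's default branch is unreachable (exact).
def pvSplitHead (s sep : String) (maxsplit : Int) : String :=
  match PySem.Str.splitMax? s sep maxsplit with
  | some (b :: _) => b
  | _ => ""

def infer_doc_id_from_names_py (names : List String) : Option String :=
  let ids : PySem.Set String :=
    names.foldl (fun ids n =>
      let base := pvSplitHead n "/" 1
      if base != "" && (PySem.Str.endswith base ".content" || PySem.Str.endswith base ".metadata") then
        PySem.Set.add ids (pvSplitHead base "." (-1))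
      else if base != "" then
        PySem.Set.add ids base
      else ids) PySem.Set.empty
  -- ids.pop() is only taken when len(ids) == 1: the popped element is the unique one (order-independent)
  if ids.length == 1 then ids.head? else none

-- ===== PORT B =====
def pvAltLoop (cand : Option String) : List String → Option String
  | [] => cand
  | n :: rest =>
    let base := pvSplitHead n "/" 1
    if base == "" then pvAltLoop cand rest
    else
      let doc := if PySem.Str.endswith base ".content" || PySem.Str.endswith base ".metadata" then
          pvSplitHead base "." (-1)
        else base
      match cand with
      | none => pvAltLoop (some doc) rest
      | some c => if doc == c then pvAltLoop cand rest else none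

def infer_doc_id_from_names_py_alt (names : List String) : Option String :=
  pvAltLoop none names

-- ===== PRECONDITION & SPEC =====
def Spec_infer_doc_id_from_names_py (names : List String) (out : Option String) : Prop := out = infer_doc_id_from_names_py_alt names
instance (names : List String) (out : Option String) : Decidable (Spec_infer_doc_id_from_names_py names out) := by unfold Spec_infer_doc_id_from_names_py; infer_instance

-- ===== CLAIM (what is proved, stated in full; the proofs are below) =====
def Claim_equal_infer_doc_id_from_names_py : Prop := ∀ (names : List String), Dom_infer_doc_id_from_names_py names → Spec_infer_doc_id_from_names_py names (infer_doc_id_from_names_py names)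

-- ===== LEMMAS AND PROOFS =====

-- per-name id A and B both compute (none = empty base, skipped)
def pvIdOf (n : String) : Option String :=
  let base := pvSplitHead n "/" 1
  if base = "" then none
  else if PySem.Str.endswith base ".content" || PySem.Str.endswith base ".metadata" then
    some (pvSplitHead base "." (-1))
  else some base

def pvStepA (ids : PySem.Set String) (n : String) : PySem.Set String :=
  let base := pvSplitHead n "/" 1
  if base != "" && (PySem.Str.endswith base ".content" || PySem.Str.endswith base ".metadata") then
    PySem.Set.add ids (pvSplitHead base "." (-1))
  else if base != "" then PySem.Set.add ids base
  else ids

def pvFinish (ids : PySem.Set String) : Option String :=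
  if ids.length == 1 then ids.head? else none

theorem pvStepA_eq (ids : PySem.Set String) (n : String) :
    pvStepA ids n = match pvIdOf n with
      | none => ids
      | some d => PySem.Set.add ids d := by
  simp only [pvStepA, pvIdOf]
  by_cases h : pvSplitHead n "/" 1 = "" <;> simp [h] <;> split_ifs <;> rfl

theorem pvLenA_mono (names : List String) (s : PySem.Set String) :
    s.length ≤ (names.foldl pvStepA s).length := by
  induction names generalizing s with
  | nil => simp
  | cons n rest ih =>
    refine le_trans ?_ (ih (pvStepA s n))
    rw [pvStepA_eq]
    cases pvIdOf n with
    | none => simp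
    | some d =>
      simp only [PySem.Set.add]
      split <;> simp

theorem pvMain (names : List String) (cand : Option String) (s : PySem.Set String)
    (h : (cand = none ∧ s = []) ∨ ∃ c, cand = some c ∧ s = [c]) :
    pvAltLoop cand names = pvFinish (names.foldl pvStepA s) := by
  induction names generalizing cand s with
  | nil =>
    rcases h with ⟨hc, hs⟩ | ⟨c, hc, hs⟩ <;> subst hc <;> subst hs <;> rfl
  | cons n rest ih =>
    rw [List.foldl_cons, pvStepA_eq]
    rw [pvAltLoop]
    simp only [pvIdOf]
    by_cases hb : pvSplitHead n "/" 1 = ""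
    · simp only [hb]
      have : (pvSplitHead n "/" 1 == "") = true := by simp [hb]
      simp only [if_true]
      exact ih cand s h
    · have hb' : (pvSplitHead n "/" 1 == "") = false := by simp [hb]
      simp only [hb, hb', Bool.false_eq_true, if_false]
      set doc := if PySem.Str.endswith (pvSplitHead n "/" 1) ".content"
          || PySem.Str.endswith (pvSplitHead n "/" 1) ".metadata" then
          pvSplitHead (pvSplitHead n "/" 1) "." (-1)
        else pvSplitHead n "/" 1 with hdoc
      have hsome : (if (PySem.Str.endswith (pvSplitHead n "/" 1) ".content"
          || PySem.Str.endswith (pvSplitHead n "/" 1) ".metadata") = true then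
          some (pvSplitHead (pvSplitHead n "/" 1) "." (-1))
        else some (pvSplitHead n "/" 1)) = some doc := by
        rw [hdoc]; split <;> rfl
      simp only [hsome]
      rcases h with ⟨hc, hs⟩ | ⟨c, hc, hs⟩
      · subst hc; subst hs
        have : PySem.Set.add ([] : PySem.Set String) doc = [doc] := rfl
        rw [this]
        exact ih (some doc) [doc] (Or.inr ⟨doc, rfl, rfl⟩)
      · subst hc; subst hs
        by_cases hdc : doc = c
        · have heq : (doc == c) = true := by simp [hdc]
          simp only [heq, if_true]
          have : PySem.Set.add ([c] : PySem.Set String) doc = [c] := by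
            rw [PySem.Set.add_of_mem]; simp [hdc]
          rw [this]
          exact ih (some c) [c] (Or.inr ⟨c, rfl, rfl⟩)
        · have hbc : (doc == c) = false := by simp [hdc]
          simp only [hbc, Bool.false_eq_true, if_false]
          have hadd : PySem.Set.add ([c] : PySem.Set String) doc = [c, doc] := by
            rw [PySem.Set.add_of_not_mem]; · rfl
            · simp only [List.mem_singleton]; exact hdc
          rw [hadd]
          have h2 : 2 ≤ (rest.foldl pvStepA [c, doc]).length := pvLenA_mono rest [c, doc]
          unfold pvFinish
          have : ((rest.foldl pvStepA [c, doc]).length == 1) = false := by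
            simp; omega
          simp [this]

-- ===== VERDICT (by name: the statement is the Claim_ definition above) =====
theorem infer_doc_id_from_names_py_spec : Claim_equal_infer_doc_id_from_names_py := by
  intro names _
  unfold Spec_infer_doc_id_from_names_py infer_doc_id_from_names_py infer_doc_id_from_names_py_alt
  rw [pvMain names none [] (Or.inl ⟨rfl, rfl⟩)]
  rfl
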